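-- pv_equiv track=rewrite | github.com/bkubick/py-learning-toolbox | py_learning_toolbox/ml_toolbox/preprocessing/language.py | create_sequences_from_sentences
-- ===== SOURCE A (Python) =====
-- import typing
--
-- def create_sequences_from_sentences(sentences: typing.List[str],
--                                     level: typing.Optional[str] = None) -> typing.List[str]:
--     """ Creates sequences of sentences from the given sentences.
--
--         Example:
--             Input: ['I love TensorFlow and AI']
--             Output: ['I love', 'I love TensorFlow', 'I love TensorFlow and', 'I love TensorFlow and AI']
--
--         Raises:
--             ValueError: If the level is not one of ['word', 'character'].
--
--         Args:
--             sentences (List[str]): The sentences to create sequences from.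
--             level (Optional[str]): The level to create sequences from.
--                 Must be one of ['word', 'character'], defaults to 'word'.
--
--         Returns:
--             (typing.List[str]) The sequences of sentences.
--     """
--     level = level or 'word'
--
--     sequences = []
--     for sentence in sentences:
--         if level == 'word':
--             words_in_sentence = sentence.split(' ')
--             for i in range(2, len(words_in_sentence) + 1):
--                 sequences.append(' '.join(words_in_sentence[:i]))
--         elif level == 'character':
--             for i in range(2, len(sentence) + 1):
--                 sequences.append(sentence[:i])
--         else:
--             raise ValueError(f'level must be one of ["word", "character"], got {level}')
--
--     return sequences
-- ===== SOURCE B (Python) =====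
-- def create_sequences_from_sentences(sentences, level=None):
--     lvl = level or 'word'
--     sequences = []
--     for sentence in sentences:
--         if lvl == 'word':
--             first, *rest = sentence.split(' ')
--             acc = first
--             for w in rest:
--                 acc = acc + ' ' + w
--                 sequences.append(acc)
--         elif lvl == 'character':
--             if sentence:
--                 acc = sentence[0]
--                 for ch in sentence[1:]:
--                     acc = acc + ch
--                     sequences.append(acc)
--         else:
--             raise ValueError(f'level must be one of ["word", "character"], got {lvl}')
--     return sequences
-- ===== Notes on version B (the rewrite author's own statement) =====
-- stated objective: alternative
-- what changed: B builds each prefix incrementally by threading a running accumulated string (word-by-word / char-by-char) instead of re-slicing and re-joining the sentence from the start for every index in range(2, len+1).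
import Mathlib
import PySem

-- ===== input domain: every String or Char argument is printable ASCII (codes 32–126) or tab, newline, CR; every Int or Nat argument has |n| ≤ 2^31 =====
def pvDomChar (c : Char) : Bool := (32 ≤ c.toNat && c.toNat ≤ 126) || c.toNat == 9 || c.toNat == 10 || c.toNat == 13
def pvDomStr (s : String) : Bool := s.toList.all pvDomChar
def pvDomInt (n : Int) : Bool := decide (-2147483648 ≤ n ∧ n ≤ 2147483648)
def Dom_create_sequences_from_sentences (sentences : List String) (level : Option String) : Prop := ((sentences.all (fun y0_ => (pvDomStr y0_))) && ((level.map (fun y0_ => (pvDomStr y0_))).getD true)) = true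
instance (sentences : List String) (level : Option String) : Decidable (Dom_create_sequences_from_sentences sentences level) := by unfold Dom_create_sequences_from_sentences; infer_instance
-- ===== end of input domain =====

-- B replaces A's per-index re-slice-and-join with an incrementally threaded accumulator string; equivalence of the return value on all inputs where A does not raise.

-- ===== PORT A =====
def create_sequences_from_sentences (sentences : List String) (level : Option String) : List String :=
  let lvl := match level with
    | none => "word"
    | some s => if s = "" then "word" else s       -- level = level or 'word'
  sentences.foldl (fun sequences sentence =>
    if lvl = "word" then
      let ws := PySem.Chars.splitOn sentence.toList [' ']
      (PySem.List.pyRange 2 ((ws.length : Int) + 1) 1).foldl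
        (fun seqs i => seqs ++ [String.ofList (PySem.Chars.join [' '] (PySem.List.slice ws none (some i)))]) sequences
    else if lvl = "character" then
      (PySem.List.pyRange 2 ((sentence.toList.length : Int) + 1) 1).foldl
        (fun seqs i => seqs ++ [String.ofList (PySem.Chars.slice sentence.toList none (some i))]) sequences
    else
      sequences      -- Python raises ValueError here; excluded by Pre_
    ) []

-- ===== PORT B =====
def pvWordAcc (acc : List Char) (rest : List (List Char)) : List (List Char) :=
  match rest with
  | [] => []
  | w :: t => (acc ++ ' ' :: w) :: pvWordAcc (acc ++ ' ' :: w) t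

def pvCharAcc (acc : List Char) (rest : List Char) : List (List Char) :=
  match rest with
  | [] => []
  | c :: t => (acc ++ [c]) :: pvCharAcc (acc ++ [c]) t

def create_sequences_from_sentences_alt (sentences : List String) (level : Option String) : List String :=
  let lvl := match level with
    | none => "word"
    | some s => if s = "" then "word" else s       -- lvl = level or 'word'
  sentences.foldl (fun sequences sentence =>
    if lvl = "word" then
      match PySem.Chars.splitOn sentence.toList [' '] with
      | [] => sequences                             -- unreachable: split(' ') is never empty
      | f :: rest => sequences ++ (pvWordAcc f rest).map String.ofList
    else if lvl = "character" then
      match sentence.toList with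
      | [] => sequences
      | c :: rest => sequences ++ (pvCharAcc [c] rest).map String.ofList
    else
      sequences      -- Python raises ValueError here; excluded by Pre_
    ) []

-- ===== PRECONDITION & SPEC =====
-- Pre_ excludes exactly the inputs on which A raises ValueError: a level other than
-- None/''/'word'/'character' together with a non-empty sentence list (B raises there too).
def Pre_create_sequences_from_sentences (sentences : List String) (level : Option String) : Prop :=
  sentences = [] ∨ level = none ∨ level = some "" ∨ level = some "word" ∨ level = some "character"
instance (sentences : List String) (level : Option String) : Decidable (Pre_create_sequences_from_sentences sentences level) := by unfold Pre_create_sequences_from_sentences; infer_instance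

def pvWitness_create_sequences_from_sentences : List String × Option String := (["I love TensorFlow and AI"], none)

def Spec_create_sequences_from_sentences (sentences : List String) (level : Option String) (out : List String) : Prop := out = create_sequences_from_sentences_alt sentences level
instance (sentences : List String) (level : Option String) (out : List String) : Decidable (Spec_create_sequences_from_sentences sentences level out) := by unfold Spec_create_sequences_from_sentences; infer_instance

-- ===== CLAIM (what is proved, stated in full; the proofs are below) =====
def Claim_equal_create_sequences_from_sentences : Prop := ∀ (sentences : List String) (level : Option String), Dom_create_sequences_from_sentences sentences level → Pre_create_sequences_from_sentences sentences level → Spec_create_sequences_from_sentences sentences level (create_sequences_from_sentences sentences level)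

-- ===== LEMMAS AND PROOFS =====

-- ' '.join of a snoc: appending one more word appends ' ' ++ word (specific sep [' ']).
theorem pvJoin_snoc (pre : List (List Char)) : ∀ (f w : List Char),
    PySem.Chars.join [' '] ((f :: pre) ++ [w]) = PySem.Chars.join [' '] (f :: pre) ++ ' ' :: w := by
  induction pre with
  | nil => intro f w; simp [PySem.Chars.join_cons_cons, PySem.Chars.join_singleton]
  | cons p ps ih =>
      intro f w
      have h1 := PySem.Chars.join_cons_cons [' '] f p (ps ++ [w])
      have h2 := PySem.Chars.join_cons_cons [' '] f p ps
      simp only [List.cons_append] at *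
      rw [h1, h2, ih p w]
      simp

-- B's word accumulator lists exactly the joined prefixes of length ≥ 2.
theorem pvWordAcc_eq (rest : List (List Char)) : ∀ (f : List Char) (pre : List (List Char)),
    pvWordAcc (PySem.Chars.join [' '] (f :: pre)) rest
      = (List.range rest.length).map
          (fun k => PySem.Chars.join [' '] (((f :: pre) ++ rest).take (pre.length + k + 2))) := by
  induction rest with
  | nil => intro f pre; simp [pvWordAcc]
  | cons w t ih =>
      intro f pre
      show (PySem.Chars.join [' '] (f :: pre) ++ ' ' :: w)
            :: pvWordAcc (PySem.Chars.join [' '] (f :: pre) ++ ' ' :: w) t = _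
      rw [← pvJoin_snoc pre f w]
      have hsn : (f :: pre) ++ [w] = f :: (pre ++ [w]) := by simp
      rw [hsn, ih f (pre ++ [w])]
      rw [List.length_cons, List.range_succ_eq_map, List.map_cons, List.map_map]
      have hlist : (f :: (pre ++ [w])) ++ t = (f :: pre) ++ (w :: t) := by simp
      have hhead : ((f :: pre) ++ (w :: t)).take (pre.length + 0 + 2) = f :: (pre ++ [w]) := by
        have : (f :: pre) ++ (w :: t) = (f :: (pre ++ [w])) ++ t := by simp
        rw [this]
        exact List.take_left' (by simp)
      rw [hlist]
      congr 1
      · rw [hhead]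
      · apply List.map_congr_left
        intro k _
        simp only [Function.comp_apply, List.length_append]
        have hk : pre.length + [w].length + k + 2 = pre.length + k.succ + 2 := by
          simp only [List.length_singleton]; omega
        rw [hk]

-- B's character accumulator lists exactly the char prefixes of length ≥ |pre|+1.
theorem pvCharAcc_eq (t : List Char) : ∀ (pre : List Char),
    pvCharAcc pre t
      = (List.range t.length).map (fun k => (pre ++ t).take (pre.length + k + 1)) := by
  induction t with
  | nil => intro pre; simp [pvCharAcc]
  | cons c t ih =>
      intro pre
      show (pre ++ [c]) :: pvCharAcc (pre ++ [c]) t = _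
      rw [ih (pre ++ [c])]
      rw [List.length_cons, List.range_succ_eq_map, List.map_cons, List.map_map]
      have hlist : (pre ++ [c]) ++ t = pre ++ (c :: t) := by simp
      have hhead : (pre ++ (c :: t)).take (pre.length + 0 + 1) = pre ++ [c] := by
        rw [← hlist]
        exact List.take_left' (by simp)
      congr 1
      · rw [hhead]
      · apply List.map_congr_left
        intro k _
        simp only [Function.comp_apply, List.length_append]
        have hk : pre.length + [c].length + k + 1 = pre.length + k.succ + 1 := by
          simp only [List.length_singleton]; omega
        rw [hk, hlist]

-- A's range-of-slices loop, rewritten as a map over List.range.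
theorem pvRange_map_take {α : Type} (xs : List α) (g : List α → String) (n : Nat) (hn : xs.length = n + 1) :
    (PySem.List.pyRange 2 ((xs.length : Int) + 1) 1).map
        (fun i => g (PySem.List.slice xs none (some i)))
      = (List.range n).map (fun k => g (xs.take (k + 2))) := by
  rw [PySem.List.pyRange_one, List.map_map]
  have hcount : (((xs.length : Int) + 1) - 2).toNat = n := by omega
  rw [hcount]
  apply List.map_congr_left
  intro k _
  simp only [Function.comp_apply]
  rw [PySem.List.slice_to xs (by omega : (0:Int) ≤ 2 + (k : Int))]
  have hk : ((2 : Int) + (k : Int)).toNat = k + 2 := by omega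
  rw [hk]

-- The per-sentence word branches agree.
theorem pvWordBranch (sentence : String) (seqs : List String) :
    (PySem.List.pyRange 2 (((PySem.Chars.splitOn sentence.toList [' ']).length : Int) + 1) 1).foldl
        (fun seqs i => seqs ++ [String.ofList (PySem.Chars.join [' '] (PySem.List.slice (PySem.Chars.splitOn sentence.toList [' ']) none (some i)))]) seqs
      = (match PySem.Chars.splitOn sentence.toList [' '] with
         | [] => seqs
         | f :: rest => seqs ++ (pvWordAcc f rest).map String.ofList) := by
  rw [PySem.List.foldl_append_singleton_eq_map]
  cases hws : PySem.Chars.splitOn sentence.toList [' '] with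
  | nil => simp [PySem.List.pyRange]
  | cons f rest =>
      rw [pvRange_map_take (f :: rest) (fun l => String.ofList (PySem.Chars.join [' '] l)) rest.length (by simp)]
      have hacc : pvWordAcc f rest
          = (List.range rest.length).map (fun k => PySem.Chars.join [' '] ((f :: rest).take (k + 2))) := by
        have := pvWordAcc_eq rest f []
        simpa [PySem.Chars.join_singleton] using this
      have hm : (match f :: rest with
          | [] => seqs
          | f :: rest => seqs ++ (pvWordAcc f rest).map String.ofList) = seqs ++ (pvWordAcc f rest).map String.ofList := rfl
      rw [hm, hacc, List.map_map]
      rfl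

-- The per-sentence character branches agree.
theorem pvCharBranch (sentence : String) (seqs : List String) :
    (PySem.List.pyRange 2 ((sentence.toList.length : Int) + 1) 1).foldl
        (fun seqs i => seqs ++ [String.ofList (PySem.Chars.slice sentence.toList none (some i))]) seqs
      = (match sentence.toList with
         | [] => seqs
         | c :: rest => seqs ++ (pvCharAcc [c] rest).map String.ofList) := by
  rw [PySem.List.foldl_append_singleton_eq_map]
  cases hcs : sentence.toList with
  | nil => simp [PySem.List.pyRange]
  | cons c rest =>
      have hsl : ∀ i : Int, PySem.Chars.slice (c :: rest) none (some i) = PySem.List.slice (c :: rest) none (some i) := by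
        intro i; simp [PySem.Chars.slice_eq_listSlice]
      simp only [PySem.Chars.slice_eq_listSlice]
      rw [pvRange_map_take (c :: rest) (fun l => String.ofList l) rest.length (by simp)]
      have hacc : pvCharAcc [c] rest
          = (List.range rest.length).map (fun k => (c :: rest).take (k + 2)) := by
        have := pvCharAcc_eq rest [c]
        simp only [List.singleton_append, List.length_singleton] at this
        rw [this]
        apply List.map_congr_left
        intro k _
        congr 1
        omega
      rw [hacc, List.map_map]
      rfl

-- A = B for a fixed valid effective level, by folding the per-sentence branch lemmas.
theorem pvFold_eq (sentences : List String) (lvl : String) (hlvl : lvl = "word" ∨ lvl = "character") :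
    ∀ (init : List String),
    sentences.foldl (fun sequences sentence =>
      if lvl = "word" then
        (PySem.List.pyRange 2 (((PySem.Chars.splitOn sentence.toList [' ']).length : Int) + 1) 1).foldl
          (fun seqs i => seqs ++ [String.ofList (PySem.Chars.join [' '] (PySem.List.slice (PySem.Chars.splitOn sentence.toList [' ']) none (some i)))]) sequences
      else if lvl = "character" then
        (PySem.List.pyRange 2 ((sentence.toList.length : Int) + 1) 1).foldl
          (fun seqs i => seqs ++ [String.ofList (PySem.Chars.slice sentence.toList none (some i))]) sequences
      else sequences) init
    = sentences.foldl (fun sequences sentence =>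
      if lvl = "word" then
        match PySem.Chars.splitOn sentence.toList [' '] with
        | [] => sequences
        | f :: rest => sequences ++ (pvWordAcc f rest).map String.ofList
      else if lvl = "character" then
        match sentence.toList with
        | [] => sequences
        | c :: rest => sequences ++ (pvCharAcc [c] rest).map String.ofList
      else sequences) init := by
  intro init
  apply PySem.List.foldl_congr_mem
  intro acc s _
  rcases hlvl with h | h <;> subst h <;> simp only [reduceIte]
  · exact pvWordBranch s acc
  · exact pvCharBranch s acc

-- ===== VERDICT (by name: the statement is the Claim_ definition above) =====
theorem create_sequences_from_sentences_spec : Claim_equal_create_sequences_from_sentences := by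
  intro sentences level _ hpre
  unfold Spec_create_sequences_from_sentences create_sequences_from_sentences create_sequences_from_sentences_alt
  rcases hpre with h | h | h | h | h
  · subst h; rfl
  · subst h; exact pvFold_eq sentences "word" (Or.inl rfl) []
  · subst h; exact pvFold_eq sentences "word" (Or.inl rfl) []
  · subst h; exact pvFold_eq sentences "word" (Or.inl rfl) []
  · subst h; exact pvFold_eq sentences "character" (Or.inr rfl) []
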